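-- pv_equiv track=rewrite | github.com/Hayden1629/bigdataproject | bigdataproject-main/dashboard/data_loader.py | canonicalize_mfr
-- ===== SOURCE A (Python) =====
-- def canonicalize_mfr(text: str) -> str:
--     cleaned = "".join(
--         ch.lower() if ch.isalnum() or ch.isspace() else " " for ch in text or ""
--     )
--     tokens = [t for t in cleaned.split() if t]
--     suffixes = {
--         "inc",
--         "incorporated",
--         "corp",
--         "corporation",
--         "company",
--         "co",
--         "ltd",
--         "limited",
--         "llc",
--         "plc",
--         "ag",
--         "gmbh",
--         "sa",
--         "nv",
--         "bv",
--         "oyj",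
--         "kk",
--     }
--     while tokens and tokens[-1] in suffixes:
--         tokens.pop()
--     return " ".join(tokens).strip()
-- ===== SOURCE B (Python) =====
-- def canonicalize_mfr(text: str) -> str:
--     cleaned = "".join(
--         ch.lower() if ch.isalnum() or ch.isspace() else " " for ch in text or ""
--     )
--     tokens = [t for t in cleaned.split() if t]
--     suffixes = {
--         "inc",
--         "incorporated",
--         "corp",
--         "corporation",
--         "company",
--         "co",
--         "ltd",
--         "limited",
--         "llc",
--         "plc",
--         "ag",
--         "gmbh",
--         "sa",
--         "nv",
--         "bv",
--         "oyj",
--         "kk",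
--     }
--     keep = 0
--     for i, tok in enumerate(tokens):
--         if tok not in suffixes:
--             keep = i + 1
--     return " ".join(tokens[:keep]).strip()
-- ===== Notes on version B (the rewrite author's own statement) =====
-- stated objective: alternative
-- what changed: The backward destructive while-pop loop over the token list is replaced by a single forward pass that records the cutoff index after the last non-suffix token, then takes tokens[:keep]; cleaning and tokenization are unchanged.
import Mathlib
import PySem

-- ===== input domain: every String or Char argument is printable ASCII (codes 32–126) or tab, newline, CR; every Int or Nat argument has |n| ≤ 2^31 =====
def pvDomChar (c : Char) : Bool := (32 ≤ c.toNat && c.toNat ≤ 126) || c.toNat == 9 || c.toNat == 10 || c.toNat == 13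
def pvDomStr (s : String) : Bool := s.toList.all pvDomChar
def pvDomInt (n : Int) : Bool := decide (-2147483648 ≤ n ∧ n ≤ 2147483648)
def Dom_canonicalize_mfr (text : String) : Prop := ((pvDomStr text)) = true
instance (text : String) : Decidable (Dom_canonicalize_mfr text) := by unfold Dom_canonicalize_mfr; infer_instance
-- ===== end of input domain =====

-- B replaces A's backward while-pop over the tokens by a forward cutoff-index scan; objective: alternative decomposition, same cost.

-- the literal suffix set both Pythons build
def mfrSuffixes : PySem.Set String := PySem.Set.ofList
  ["inc", "incorporated", "corp", "corporation", "company", "co", "ltd", "limited",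
   "llc", "plc", "ag", "gmbh", "sa", "nv", "bv", "oyj", "kk"]

-- ===== PORT A =====
-- A's `while tokens and tokens[-1] in suffixes: tokens.pop()`
def popTrailing (ts : List String) : List String :=
  match h : ts.getLast? with
  | some t => if PySem.Set.contains mfrSuffixes t then popTrailing ts.dropLast else ts
  | none => ts
termination_by ts.length
decreasing_by
  have hne : ts ≠ [] := by intro hnil; simp [hnil] at h
  have hpos : 0 < ts.length := List.length_pos_of_ne_nil hne
  have hlen : ts.dropLast.length = ts.length - 1 := by simp
  omega

def canonicalize_mfr (text : String) : String :=
  let cleaned := String.mk (text.toList.map (fun ch =>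
    if PySem.Chars.isalnum ch || PySem.Chars.isspace ch then PySem.Chars.lowerChar ch else ' '))
  let tokens := (PySem.Str.split₀ cleaned).filter (fun t => t != "")
  PySem.Str.strip (PySem.Str.join " " (popTrailing tokens))

-- ===== PORT B =====
def canonicalize_mfr_alt (text : String) : String :=
  let cleaned := String.mk (text.toList.map (fun ch =>
    if PySem.Chars.isalnum ch || PySem.Chars.isspace ch then PySem.Chars.lowerChar ch else ' '))
  let tokens := (PySem.Str.split₀ cleaned).filter (fun t => t != "")
  let keep : Int := (PySem.List.enumerate tokens).foldl
    (fun k p => if PySem.Set.contains mfrSuffixes p.2 then k else p.1 + 1) 0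
  PySem.Str.strip (PySem.Str.join " " (PySem.List.slice tokens none (some keep)))

-- ===== PRECONDITION & SPEC =====
def Spec_canonicalize_mfr (text : String) (out : String) : Prop := out = canonicalize_mfr_alt text
instance (text : String) (out : String) : Decidable (Spec_canonicalize_mfr text out) := by unfold Spec_canonicalize_mfr; infer_instance

-- ===== CLAIM (what is proved, stated in full; the proofs are below) =====
def Claim_equal_canonicalize_mfr : Prop := ∀ (text : String), Dom_canonicalize_mfr text → Spec_canonicalize_mfr text (canonicalize_mfr text)

-- ===== LEMMAS AND PROOFS =====

def keepOf (ts : List String) : Int :=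
  (PySem.List.enumerate ts).foldl
    (fun k p => if PySem.Set.contains mfrSuffixes p.2 then k else p.1 + 1) 0

lemma enumerate_append (xs ys : List String) (s : Int) :
    PySem.List.enumerate (xs ++ ys) s = PySem.List.enumerate xs s ++ PySem.List.enumerate ys (s + xs.length) := by
  induction xs generalizing s with
  | nil => simp [PySem.List.enumerate_nil]
  | cons a as ih =>
      simp [PySem.List.enumerate_cons, ih, add_assoc]
      ring_nf

lemma keepOf_append_singleton (ts : List String) (t : String) :
    keepOf (ts ++ [t]) = if PySem.Set.contains mfrSuffixes t then keepOf ts else (ts.length : Int) + 1 := by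
  unfold keepOf
  rw [enumerate_append]
  simp [PySem.List.enumerate_cons, PySem.List.enumerate_nil, List.foldl_append]

lemma keepOf_bounds (ts : List String) : 0 ≤ keepOf ts ∧ keepOf ts ≤ ts.length := by
  induction ts using List.reverseRecOn with
  | nil => simp [keepOf, PySem.List.enumerate_nil]
  | append_singleton ts t ih =>
      rw [keepOf_append_singleton]
      rcases ih with ⟨h0, h1⟩
      split_ifs <;> simp <;> omega

lemma popTrailing_concat (ts : List String) (t : String) :
    popTrailing (ts ++ [t]) =
      if PySem.Set.contains mfrSuffixes t then popTrailing ts else ts ++ [t] := by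
  rw [popTrailing]
  split
  · next t' h =>
      rw [List.getLast?_concat] at h
      injection h with h
      subst h
      rw [List.dropLast_concat]
  · next h =>
      rw [List.getLast?_concat] at h
      exact absurd h (by simp)

lemma popTrailing_eq_take (ts : List String) :
    popTrailing ts = ts.take (keepOf ts).toNat := by
  induction ts using List.reverseRecOn with
  | nil => simp [popTrailing, keepOf, PySem.List.enumerate_nil]
  | append_singleton ts t ih =>
      rw [popTrailing_concat, keepOf_append_singleton]
      by_cases h : PySem.Set.contains mfrSuffixes t = true
      · have hb := keepOf_bounds ts
        have hle : (keepOf ts).toNat ≤ ts.length := by omega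
        rw [if_pos h, if_pos h, ih, List.take_append_of_le_length hle]
      · have hn : (((ts.length : Int) + 1)).toNat = ts.length + 1 := by omega
        rw [if_neg h, if_neg h, hn, List.take_of_length_le (by simp)]

lemma popTrailing_eq_slice (ts : List String) :
    popTrailing ts = PySem.List.slice ts none (some ((PySem.List.enumerate ts).foldl
      (fun k p => if PySem.Set.contains mfrSuffixes p.2 then k else p.1 + 1) 0)) := by
  have h0 : (0 : Int) ≤ (PySem.List.enumerate ts).foldl
      (fun k p => if PySem.Set.contains mfrSuffixes p.2 then k else p.1 + 1) 0 :=
    (keepOf_bounds ts).1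
  rw [popTrailing_eq_take, PySem.List.slice_to _ h0]
  rfl

-- ===== VERDICT (by name: the statement is the Claim_ definition above) =====
theorem canonicalize_mfr_spec : Claim_equal_canonicalize_mfr := by
  intro text _
  simp only [Spec_canonicalize_mfr, canonicalize_mfr, canonicalize_mfr_alt]
  rw [popTrailing_eq_slice]
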